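-- pv_equiv track=rewrite | github.com/AbhishekDuddupudi/SQL_Agent_Chatbot | backend/app/services/chart.py | _pick_best_categorical
-- ===== SOURCE A (Python) =====
-- from typing import List, Dict, Any, Optional
--
-- def _pick_best_categorical(cols: List[str]) -> str:
--     """Pick the most relevant categorical column for visualization."""
--     priority_keywords = ['name', 'product', 'territory', 'category', 'region', 'label']
--
--     for keyword in priority_keywords:
--         for col in cols:
--             if keyword in col.lower():
--                 return col
--
--     # Avoid id columns
--     non_id_cols = [c for c in cols if 'id' not in c.lower()]
--     return non_id_cols[0] if non_id_cols else cols[0]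
-- ===== SOURCE B (Python) =====
-- from typing import List
--
-- def _pick_best_categorical(cols: List[str]) -> str:
--     """Pick the most relevant categorical column for visualization."""
--     priority_keywords = ['name', 'product', 'territory', 'category', 'region', 'label']
--     sentinel = len(priority_keywords)
--
--     def prio(col: str) -> int:
--         low = col.lower()
--         for i, kw in enumerate(priority_keywords):
--             if kw in low:
--                 return i
--         return sentinel
--
--     best = min(cols, key=prio)  # stable: first column with the smallest priority
--     if prio(best) < sentinel:
--         return best
--
--     # Avoid id columns
--     non_id_cols = [c for c in cols if 'id' not in c.lower()]
--     return non_id_cols[0] if non_id_cols else cols[0]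
-- ===== Notes on version B (the rewrite author's own statement) =====
-- stated objective: alternative
-- what changed: Replaces the keyword-outer nested short-circuit search with a per-column priority function (index of first matching keyword, len(keywords) as sentinel) and a single stable min-by-key argmin pass; same id-avoidance fallback when no keyword matches.
-- outside the precondition, e.g. on _pick_best_categorical([]): A raises IndexError, B raises ValueError
import Mathlib
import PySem

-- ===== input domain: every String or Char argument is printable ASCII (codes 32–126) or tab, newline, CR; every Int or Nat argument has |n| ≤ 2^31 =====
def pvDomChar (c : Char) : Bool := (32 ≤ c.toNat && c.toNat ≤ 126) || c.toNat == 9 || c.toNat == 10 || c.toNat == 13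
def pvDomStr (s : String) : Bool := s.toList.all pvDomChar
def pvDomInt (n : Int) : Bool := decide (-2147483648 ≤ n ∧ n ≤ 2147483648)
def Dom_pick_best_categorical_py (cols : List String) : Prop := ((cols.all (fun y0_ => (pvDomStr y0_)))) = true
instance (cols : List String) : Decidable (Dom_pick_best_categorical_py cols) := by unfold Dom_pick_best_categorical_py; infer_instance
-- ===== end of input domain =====

-- B replaces A's keyword-outer nested short-circuit search by a per-column priority
-- table (index of first matching keyword) and one stable min-by-key pass (alternative
-- decomposition, same cost; same fallback).


-- ===== PORT A =====
def pvKeywords : List String := ["name", "product", "territory", "category", "region", "label"]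

-- 'keyword in col.lower()'
def pvMatches (col kw : String) : Bool := PySem.Str.isIn kw (PySem.Str.lower col)

-- shared tail of both Pythons: non_id_cols[0] if non_id_cols else cols[0]
-- (cols = [] is where Python raises IndexError; excluded by Pre_)
def pvFallback (cols : List String) : String :=
  match cols.filter (fun c => !(PySem.Str.isIn "id" (PySem.Str.lower c))) with
  | c :: _ => c
  | [] => cols.headD ""

-- A: for keyword in priority_keywords: for col in cols: if keyword in col.lower(): return col
def pick_best_categorical_py (cols : List String) : String :=
  match pvKeywords.findSome? (fun kw => cols.find? (fun col => pvMatches col kw)) with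
  | some col => col
  | none => pvFallback cols

-- ===== PORT B =====
-- prio(col): index of the first priority keyword contained in col.lower(), else len(keywords)
def pvPrio (kws : List String) (col : String) : Nat :=
  kws.findIdx (fun kw => pvMatches col kw)

-- best = min(cols, key=prio); return best if its priority is a real match, else the fallback
def pick_best_categorical_py_alt (cols : List String) : String :=
  match PySem.List.min? cols (pvPrio pvKeywords) with
  | some best =>
      if pvPrio pvKeywords best < pvKeywords.length then best else pvFallback cols
  | none => ""   -- cols = []: Python's min raises ValueError; excluded by Pre_

-- ===== PRECONDITION & SPEC =====
-- Pre_ excludes only the empty list, on which both Pythons raise (IndexError / ValueError).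
def Pre_pick_best_categorical_py (cols : List String) : Prop := cols ≠ []
instance (cols : List String) : Decidable (Pre_pick_best_categorical_py cols) := by unfold Pre_pick_best_categorical_py; infer_instance
def pvWitness_pick_best_categorical_py : List String := (["user_id", "region"])

def Spec_pick_best_categorical_py (cols : List String) (out : String) : Prop := out = pick_best_categorical_py_alt cols
instance (cols : List String) (out : String) : Decidable (Spec_pick_best_categorical_py cols out) := by unfold Spec_pick_best_categorical_py; infer_instance

-- ===== CLAIM (what is proved, stated in full; the proofs are below) =====
def Claim_equal_pick_best_categorical_py : Prop := ∀ (cols : List String), Dom_pick_best_categorical_py cols → Pre_pick_best_categorical_py cols → Spec_pick_best_categorical_py cols (pick_best_categorical_py cols)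

-- ===== LEMMAS AND PROOFS =====

-- the fold step of PySem.List.min? (Nat keys)
def pvStep (f : String → Nat) (acc : Option String) (x : String) : Option String :=
  match acc with
  | none => some x
  | some m => if f x < f m then some x else some m

theorem pvMin?_eq_foldl (xs : List String) (f : String → Nat) :
    PySem.List.min? xs f = xs.foldl (pvStep f) none := by
  unfold PySem.List.min?
  congr 1
  funext acc x
  cases acc <;> rfl

-- a key-0 accumulator is never replaced
theorem pvFoldl_step_zero (f : String → Nat) (xs : List String) (m : String) (hm : f m = 0) :
    xs.foldl (pvStep f) (some m) = some m := by
  induction xs with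
  | nil => rfl
  | cons x t ih => simp [List.foldl_cons, pvStep, hm, ih]

-- the first key-0 element wins the stable min fold
theorem pvFoldl_step_first_zero (f : String → Nat) (q : String → Bool)
    (hq : ∀ x, q x = true ↔ f x = 0) :
    ∀ (xs : List String) (acc : Option String) (c : String),
      (∀ m, acc = some m → 0 < f m) → xs.find? q = some c →
      xs.foldl (pvStep f) acc = some c := by
  intro xs
  induction xs with
  | nil => intro acc c _ h; simp at h
  | cons x t ih =>
      intro acc c hacc hfind
      by_cases hx : q x = true
      · have hx0 : f x = 0 := (hq x).mp hx
        have hc : c = x := by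
          rw [List.find?_cons_of_pos hx] at hfind
          exact (Option.some_inj.mp hfind).symm
        subst hc
        have hstep : pvStep f acc c = some c := by
          cases acc with
          | none => rfl
          | some m =>
              have hm := hacc m rfl
              simp [pvStep, hx0, hm]
        rw [List.foldl_cons, hstep]
        exact pvFoldl_step_zero f t c hx0
      · have hfx : 0 < f x := by
          rcases Nat.eq_zero_or_pos (f x) with h0 | h
          · exact absurd ((hq x).mpr h0) hx
          · exact h
        rw [List.find?_cons_of_neg hx] at hfind
        rw [List.foldl_cons]
        apply ih (pvStep f acc x) c _ hfind
        intro m' hm'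
        cases acc with
        | none =>
            simp [pvStep] at hm'; subst hm'; exact hfx
        | some m =>
            have hm := hacc m rfl
            simp only [pvStep] at hm'
            split at hm' <;> (cases hm'; first | exact hfx | exact hm)

-- min-fold congruence: shifting every key by +1 does not change the chosen element
theorem pvFoldl_step_shift (f g : String → Nat) :
    ∀ (xs : List String) (acc : Option String),
      (∀ x ∈ xs, f x = g x + 1) → (∀ m, acc = some m → f m = g m + 1) →
      xs.foldl (pvStep f) acc = xs.foldl (pvStep g) acc := by
  intro xs
  induction xs with
  | nil => intro _ _ _; rfl
  | cons x t ih =>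
      intro acc hxs hacc
      have hx : f x = g x + 1 := hxs x (by simp)
      have hstep : pvStep f acc x = pvStep g acc x := by
        cases acc with
        | none => rfl
        | some m =>
            have hm := hacc m rfl
            simp [pvStep, hx, hm]
      rw [List.foldl_cons, List.foldl_cons, hstep]
      apply ih _ (fun y hy => hxs y (by simp [hy]))
      intro m' hm'
      cases acc with
      | none =>
          simp [pvStep] at hm'; subst hm'; exact hx
      | some m =>
          have hm := hacc m rfl
          simp only [pvStep] at hm'
          split at hm' <;> (cases hm'; first | exact hx | exact hm)

-- the heart: A's keyword-outer search equals B's argmin-of-priorities, for any keyword list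
set_option maxHeartbeats 1600000 in
theorem pvMain (kws : List String) : ∀ (cols : List String),
    kws.findSome? (fun kw => cols.find? (fun col => pvMatches col kw)) =
      (PySem.List.min? cols (pvPrio kws)).bind
        (fun b => if pvPrio kws b < kws.length then some b else none) := by
  induction kws with
  | nil =>
      intro cols
      cases PySem.List.min? cols (pvPrio []) <;> simp [pvPrio]
  | cons kw rest ih =>
      intro cols
      rw [List.findSome?_cons]
      cases hfind : cols.find? (fun col => pvMatches col kw) with
      | some c =>
          have hq : ∀ x, pvMatches x kw = true ↔ pvPrio (kw :: rest) x = 0 := by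
            intro x
            simp only [pvPrio, List.findIdx_cons]
            cases pvMatches x kw <;> simp
          have hmin : PySem.List.min? cols (pvPrio (kw :: rest)) = some c := by
            rw [pvMin?_eq_foldl]
            exact pvFoldl_step_first_zero (pvPrio (kw :: rest))
              (fun col => pvMatches col kw) hq cols none c (by intro m h; cases h) hfind
          have hPc : pvMatches c kw = true := by
            simpa using List.find?_some hfind
          have hc0 : pvPrio (kw :: rest) c = 0 := (hq c).mp hPc
          simp [hmin, hc0]
      | none =>
          have hnone : ∀ x ∈ cols, pvMatches x kw = false := by
            intro x hx
            simpa using List.find?_eq_none.mp hfind x hx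
          have hshift : ∀ x ∈ cols, pvPrio (kw :: rest) x = pvPrio rest x + 1 := by
            intro x hx
            simp [pvPrio, List.findIdx_cons, hnone x hx]
          have hmin : PySem.List.min? cols (pvPrio (kw :: rest)) =
              PySem.List.min? cols (pvPrio rest) := by
            rw [pvMin?_eq_foldl, pvMin?_eq_foldl]
            exact pvFoldl_step_shift _ _ cols none hshift (by intro m h; cases h)
          rw [hmin, ih cols]
          cases hm : PySem.List.min? cols (pvPrio rest) with
          | none => simp
          | some b =>
              have hb : b ∈ cols := PySem.List.min?_mem hm
              have hsb := hshift b hb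
              simp only [Option.bind_some, List.length_cons, hsb]
              by_cases hlt : pvPrio rest b < rest.length <;> simp [hlt]

theorem pvMin?_ne_none (x : String) (t : List String) (f : String → Nat) :
    PySem.List.min? (x :: t) f ≠ none := by
  rw [pvMin?_eq_foldl, List.foldl_cons]
  show t.foldl (pvStep f) (pvStep f none x) ≠ none
  have : ∀ (xs : List String) (m : String), xs.foldl (pvStep f) (some m) ≠ none := by
    intro xs
    induction xs with
    | nil => intro m h; cases h
    | cons y ys ih =>
        intro m
        rw [List.foldl_cons]
        simp only [pvStep]
        split <;> apply ih
  exact this t x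

theorem pick_best_categorical_py_spec : Claim_equal_pick_best_categorical_py := by
  intro cols _ hpre
  unfold Spec_pick_best_categorical_py pick_best_categorical_py pick_best_categorical_py_alt
  rw [pvMain pvKeywords cols]
  cases hm : PySem.List.min? cols (pvPrio pvKeywords) with
  | none =>
      cases cols with
      | nil => exact absurd rfl hpre
      | cons x t => exact absurd hm (pvMin?_ne_none x t _)
  | some b =>
      by_cases hlt : pvPrio pvKeywords b < pvKeywords.length <;> simp [hlt]
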